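-- pv_equiv track=rewrite | github.com/andresaguilar2003/gdpr_trace | gdpr/validators/validators.py | deduplicate_sp_violations
-- ===== SOURCE A (Python) =====
-- def deduplicate_sp_violations(violations):
--     sp_types = {
--         v["type"].replace("sp_", "")
--         for v in violations
--         if v["type"].startswith("sp_")
--     }
--
--     filtered = []
--     for v in violations:
--         if v["type"] in sp_types:
--             continue  # absorbida por SP
--         filtered.append(v)
--
--     return filtered
-- ===== SOURCE B (Python) =====
-- def deduplicate_sp_violations(violations):
--     # Keep each violation unless some SP-typed violation in the list absorbs it.
--     return [
--         v for v in violations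
--         if not any(
--             w["type"].startswith("sp_")
--             and w["type"].replace("sp_", "") == v["type"]
--             for w in violations
--         )
--     ]
-- ===== Notes on version B (the rewrite author's own statement) =====
-- stated objective: alternative
-- what changed: Replaces the precomputed absorbed-type set with a direct quadratic filter: keep v iff no violation w has an sp_ type whose sp_-stripped form equals v's type.
import Mathlib
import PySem

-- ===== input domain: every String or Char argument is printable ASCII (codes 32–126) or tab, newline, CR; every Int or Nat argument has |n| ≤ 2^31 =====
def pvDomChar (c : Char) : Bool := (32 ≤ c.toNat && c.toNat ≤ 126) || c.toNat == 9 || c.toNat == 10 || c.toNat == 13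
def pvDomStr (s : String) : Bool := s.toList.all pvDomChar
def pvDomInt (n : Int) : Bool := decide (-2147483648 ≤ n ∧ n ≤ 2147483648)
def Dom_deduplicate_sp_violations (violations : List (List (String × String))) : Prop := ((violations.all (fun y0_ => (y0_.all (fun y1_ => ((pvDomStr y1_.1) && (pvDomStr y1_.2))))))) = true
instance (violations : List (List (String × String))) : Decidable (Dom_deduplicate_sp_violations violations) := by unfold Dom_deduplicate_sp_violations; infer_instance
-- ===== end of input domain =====

-- B replaces A's precomputed absorbed-type set with a direct quadratic filter (alternative decomposition, not faster).

-- ===== PORT A =====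
-- v["type"]: total form of the dict access; exact under Pre_ (key "type" present in every element)
def pvType (v : List (String × String)) : String := PySem.Dict.getD ⟨v⟩ "type" ""

def deduplicate_sp_violations (violations : List (List (String × String))) : List (List (String × String)) :=
  let sp_types : PySem.Set String :=
    violations.foldl (fun s v =>
      if PySem.Str.startswith (pvType v) "sp_" then
        PySem.Set.add s (PySem.Str.replace (pvType v) "sp_" "")
      else s) PySem.Set.empty
  violations.foldl (fun acc v =>
    if PySem.Set.contains sp_types (pvType v) then acc else acc ++ [v]) []

-- ===== PORT B =====
def deduplicate_sp_violations_alt (violations : List (List (String × String))) : List (List (String × String)) :=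
  violations.filter (fun v =>
    !(violations.any (fun w =>
      PySem.Str.startswith (pvType w) "sp_" &&
      (PySem.Str.replace (pvType w) "sp_" "" == pvType v))))

-- ===== PRECONDITION & SPEC =====
-- Pre_: every element must carry the key "type"; Python A raises KeyError otherwise.
def Pre_deduplicate_sp_violations (violations : List (List (String × String))) : Prop :=
  ∀ v ∈ violations, PySem.Dict.contains (PySem.Dict.mk v) "type" = true
instance (violations : List (List (String × String))) : Decidable (Pre_deduplicate_sp_violations violations) := by unfold Pre_deduplicate_sp_violations; infer_instance
def pvWitness_deduplicate_sp_violations : (List (List (String × String))) :=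
  [[("type", "sp_x")], [("type", "x"), ("msg", "m")], [("type", "y")]]

def Spec_deduplicate_sp_violations (violations : List (List (String × String))) (out : List (List (String × String))) : Prop := out = deduplicate_sp_violations_alt violations
instance (violations : List (List (String × String))) (out : List (List (String × String))) : Decidable (Spec_deduplicate_sp_violations violations out) := by unfold Spec_deduplicate_sp_violations; infer_instance

-- ===== CLAIM (what is proved, stated in full; the proofs are below) =====
def Claim_equal_deduplicate_sp_violations : Prop := ∀ (violations : List (List (String × String))), Dom_deduplicate_sp_violations violations → Pre_deduplicate_sp_violations violations → Spec_deduplicate_sp_violations violations (deduplicate_sp_violations violations)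

-- ===== LEMMAS AND PROOFS =====

theorem pv_contains_add (s : PySem.Set String) (x t : String) :
    PySem.Set.contains (PySem.Set.add s x) t = (PySem.Set.contains s t || t == x) := by
  by_cases h : t = x <;> by_cases h2 : t ∈ s <;>
    simp [PySem.Set.mem_add, h, h2]

theorem pv_spfold_contains (vs : List (List (String × String))) (acc : PySem.Set String) (t : String) :
    PySem.Set.contains
      (vs.foldl (fun s v =>
        if PySem.Str.startswith (pvType v) "sp_" then
          PySem.Set.add s (PySem.Str.replace (pvType v) "sp_" "")
        else s) acc) t
    = (PySem.Set.contains acc t ||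
       vs.any (fun w =>
         PySem.Str.startswith (pvType w) "sp_" &&
         (PySem.Str.replace (pvType w) "sp_" "" == t))) := by
  induction vs generalizing acc with
  | nil => simp
  | cons v vs ih =>
    simp only [List.foldl_cons, List.any_cons]
    rcases hs : PySem.Str.startswith (pvType v) "sp_" with _ | _
    · rw [if_neg (by simp), ih]
      simp
    · rw [if_pos rfl, ih, pv_contains_add]
      have hsymm : (t == PySem.Str.replace (pvType v) "sp_" "")
          = (PySem.Str.replace (pvType v) "sp_" "" == t) := by
        by_cases h : t = PySem.Str.replace (pvType v) "sp_" ""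
        · simp [h]
        · simp [h, Ne.symm h]
      rw [hsymm]
      cases PySem.Set.contains acc t <;>
        cases (PySem.Str.replace (pvType v) "sp_" "" == t) <;> simp

theorem pv_foldl_skip (p : List (String × String) → Bool) (vs : List (List (String × String)))
    (acc : List (List (String × String))) :
    vs.foldl (fun acc v => if p v then acc else acc ++ [v]) acc
      = acc ++ vs.filter (fun v => !(p v)) := by
  induction vs generalizing acc with
  | nil => simp
  | cons v vs ih =>
    rcases h : p v with _ | _ <;> simp [h, ih]

-- ===== VERDICT (by name: the statement is the Claim_ definition above) =====
theorem deduplicate_sp_violations_spec : Claim_equal_deduplicate_sp_violations := by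
  intro violations _ _
  unfold Spec_deduplicate_sp_violations deduplicate_sp_violations deduplicate_sp_violations_alt
  rw [pv_foldl_skip]
  simp only [List.nil_append]
  apply List.filter_congr
  intro v _
  rw [pv_spfold_contains]
  simp
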